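-- pv_equiv track=rewrite | github.com/dragos-vacariu/Python-Codes | Tkinter GUI Projects/pyplay mp3 player/mp3player_main.py | fontTransition
-- ===== SOURCE A (Python) =====
-- def fontTransition(Message):
--     Message = list(Message)
--     for x in range(0, len(Message)):
--         if Message[x] == "_":
--             if(x+1<len(Message)):
--                 Message[x] = Message[x+1]
--                 Message[x+1] = "_"
--             else:
--                 Message[x] = Message[0]
--                 Message[0] = "_"
--     return "".join(Message)
-- ===== SOURCE B (Python) =====
-- def fontTransition(Message):
--     chars = list(Message)
--     if '_' not in chars:
--         return ''.join(chars)
--     i = chars.index('_')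
--     rest = chars[:i] + chars[i+1:]
--     return '_' + ''.join(rest[1:] + rest[:1])
-- ===== Notes on version B (the rewrite author's own statement) =====
-- stated objective: simpler
-- what changed: Replaces the index-by-index cascading in-place swap loop (which drags the underscore to the end and then wraps it to the front) by a closed form: find the first underscore, delete it, rotate the remaining characters left by one, and prepend an underscore.
import Mathlib
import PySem

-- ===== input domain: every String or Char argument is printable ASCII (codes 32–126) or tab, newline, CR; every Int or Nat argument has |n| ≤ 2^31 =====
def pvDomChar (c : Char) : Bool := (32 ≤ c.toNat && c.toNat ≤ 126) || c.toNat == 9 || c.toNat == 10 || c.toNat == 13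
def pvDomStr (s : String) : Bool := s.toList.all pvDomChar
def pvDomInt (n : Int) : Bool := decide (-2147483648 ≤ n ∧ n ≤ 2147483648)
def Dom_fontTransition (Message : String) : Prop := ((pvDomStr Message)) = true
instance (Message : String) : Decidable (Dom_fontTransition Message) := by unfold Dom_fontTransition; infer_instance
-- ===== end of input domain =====

-- B replaces A's cascading in-place swap loop by a closed form (find the first underscore,
-- delete it, rotate the rest left by one, prepend an underscore): simpler, same cost.

-- ===== PORT A =====
-- one iteration of A's for-loop body at index x on the mutable list m
-- (indices read by the loop are always in range, so pyGetD's default is never used;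
--  Message[x] = Message[0] is read-then-write, as in Python)
def fontTransitionStep (m : List Char) (x : Nat) : List Char :=
  if PySem.List.pyGetD m (x : Int) ' ' = '_' then
    if x + 1 < m.length then
      (m.set x (PySem.List.pyGetD m ((x : Int) + 1) ' ')).set (x + 1) '_'
    else
      (m.set x (PySem.List.pyGetD m 0 ' ')).set 0 '_'
  else m

def fontTransition (Message : String) : String :=
  String.ofList ((List.range Message.toList.length).foldl fontTransitionStep Message.toList)

-- ===== PORT B =====
def fontTransition_alt (Message : String) : String :=
  match PySem.List.index? Message.toList '_' with
  | none => String.ofList Message.toList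
  | some i =>
      let rest := PySem.List.slice Message.toList none (some (i : Int)) ++
                  PySem.List.slice Message.toList (some ((i : Int) + 1)) none
      String.ofList ('_' :: (PySem.List.slice rest (some 1) none ++
                             PySem.List.slice rest none (some 1)))

-- ===== PRECONDITION & SPEC =====
def Spec_fontTransition (Message : String) (out : String) : Prop := out = fontTransition_alt Message
instance (Message : String) (out : String) : Decidable (Spec_fontTransition Message out) := by unfold Spec_fontTransition; infer_instance

-- ===== CLAIM (what is proved, stated in full; the proofs are below) =====
def Claim_equal_fontTransition : Prop := ∀ (Message : String), Dom_fontTransition Message → Spec_fontTransition Message (fontTransition Message)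

-- ===== LEMMAS AND PROOFS =====

-- reading the element sitting right after a prefix
theorem pyGetD_mid (P S : List Char) (c d : Char) :
    PySem.List.pyGetD (P ++ c :: S) (P.length : Int) d = c := by
  simp [PySem.List.pyGetD_natCast, List.getD]

-- writing the element sitting right after a prefix
theorem set_mid (P S : List Char) (c v : Char) :
    (P ++ c :: S).set P.length v = P ++ v :: S := by
  rw [List.set_append_right _ _ (le_refl P.length)]; simp

-- Phase 1: the loop leaves the list unchanged over an underscore-free range of indices.
theorem foldl_step_no_underscore (l : List Char) (a k : Nat)
    (h : ∀ j, a ≤ j → j < a + k → ∀ hj : j < l.length, l[j] ≠ '_') :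
    (List.range' a k).foldl fontTransitionStep l = l := by
  induction k generalizing a with
  | zero => rfl
  | succ k ih =>
      rw [List.range'_succ, List.foldl_cons]
      have hstep : fontTransitionStep l a = l := by
        unfold fontTransitionStep
        by_cases ha : a < l.length
        · have hv : PySem.List.pyGetD l (a : Int) ' ' = l[a] := by
            simp [PySem.List.pyGetD_natCast, List.getD, List.getElem?_eq_getElem ha]
          rw [hv]
          simp [h a le_rfl (by omega) ha]
        · have hnone : l[a]? = none := List.getElem?_eq_none_iff.mpr (Nat.le_of_not_lt ha)
          simp [PySem.List.pyGetD_natCast, List.getD, hnone]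
      rw [hstep]
      exact ih (a + 1) (fun j h1 h2 hj => h j (by omega) (by omega) hj)

-- Phase 2: from state P ++ '_' :: S at index P.length, the remaining iterations
-- cascade the underscore to the end, wrap, and yield '_' on the left rotation of P ++ S.
theorem foldl_step_cascade (S P : List Char) :
    (List.range' P.length (S.length + 1)).foldl fontTransitionStep (P ++ '_' :: S)
      = '_' :: ((P ++ S).drop 1 ++ (P ++ S).take 1) := by
  induction S generalizing P with
  | nil =>
      simp only [List.range'_succ, List.length_nil, List.range'_zero, List.foldl_cons, List.foldl_nil]
      unfold fontTransitionStep
      rw [pyGetD_mid P [] '_' ' ', if_pos rfl,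
        if_neg (by simp : ¬ (P.length + 1 < (P ++ '_' :: []).length))]
      cases P with
      | nil => simp [PySem.List.pyGetD_zero_cons]
      | cons p ps =>
          have h0 : PySem.List.pyGetD ((p :: ps) ++ '_' :: []) 0 ' ' = p := by
            simp [PySem.List.pyGetD_zero_cons]
          rw [h0, set_mid (p :: ps) [] '_' p]
          simp
  | cons c S' ih =>
      rw [List.range'_succ, List.foldl_cons]
      have hstep : fontTransitionStep (P ++ '_' :: c :: S') P.length
          = (P ++ [c]) ++ '_' :: S' := by
        unfold fontTransitionStep
        have hget1 : PySem.List.pyGetD (P ++ '_' :: c :: S') ((P.length : Int) + 1) ' ' = c := by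
          rw [show P ++ '_' :: c :: S' = (P ++ ['_']) ++ c :: S' by simp,
            show ((P.length : Int) + 1) = (((P ++ ['_']).length : Nat) : Int) by simp]
          exact pyGetD_mid (P ++ ['_']) S' c ' '
        rw [pyGetD_mid P (c :: S') '_' ' ', if_pos rfl, if_pos (by simp), hget1,
          set_mid P (c :: S') '_' c,
          show P ++ c :: c :: S' = (P ++ [c]) ++ c :: S' by simp,
          show P.length + 1 = (P ++ [c]).length by simp,
          set_mid (P ++ [c]) S' c '_']
      rw [hstep, show P.length + 1 = (P ++ [c]).length by simp]
      have hlen : (c :: S').length = S'.length + 1 := rfl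
      rw [hlen, ih (P ++ [c])]
      simp

-- splitting the index range at the first underscore
theorem range_split (i k : Nat) :
    List.range (i + k) = List.range' 0 i ++ List.range' i k := by
  rw [List.range_eq_range', ← List.range'_append_1]
  norm_num

-- ===== VERDICT (by name: the statement is the Claim_ definition above) =====
theorem fontTransition_spec : Claim_equal_fontTransition := by
  intro Message _
  unfold Spec_fontTransition fontTransition fontTransition_alt
  generalize Message.toList = l
  cases hidx : PySem.List.index? l '_' with
  | none =>
      have hno : '_' ∉ l := (PySem.List.index?_eq_none_iff l '_').mp hidx
      rw [List.range_eq_range',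
        foldl_step_no_underscore l 0 l.length
          (fun j _ h2 hj hc => hno (hc ▸ List.getElem_mem hj))]
  | some i =>
      obtain ⟨pre, suf, hsplit, hlenpre, hnotpre⟩ :=
        (PySem.List.index?_eq_some_iff l '_' i).mp hidx
      subst hlenpre
      subst hsplit
      dsimp only
      rw [show (pre ++ '_' :: suf).length = pre.length + (suf.length + 1) by simp,
        range_split pre.length (suf.length + 1), List.foldl_append,
        foldl_step_no_underscore (pre ++ '_' :: suf) 0 pre.length (by
          intro j _ h2 hj hc
          have hjpre : j < pre.length := by omega
          exact hnotpre (hc ▸ (List.getElem_append_left hjpre) ▸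
            List.getElem_mem hjpre)),
        foldl_step_cascade suf pre]
      have h1 : PySem.List.slice (pre ++ '_' :: suf) none (some (pre.length : Int)) = pre := by
        rw [PySem.List.slice_to_natCast]
        simp
      have h2 : PySem.List.slice (pre ++ '_' :: suf) (some ((pre.length : Int) + 1)) none
          = suf := by
        rw [show ((pre.length : Int) + 1) = (((pre.length + 1 : Nat)) : Int) by push_cast; ring_nf,
          PySem.List.slice_from_natCast,
          show pre ++ '_' :: suf = (pre ++ ['_']) ++ suf by simp,
          show pre.length + 1 = (pre ++ ['_']).length by simp,
          List.drop_left]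
      rw [h1, h2, PySem.List.slice_from_one,
        PySem.List.slice_to _ (by norm_num : (0:Int) ≤ 1)]
      simp
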